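-- pv_equiv track=rewrite | github.com/playX18/asmkit | meta/x86_v2.py | _trait_name_for_mnemonic
-- ===== SOURCE A (Python) =====
-- def _trait_name_for_mnemonic(base_mnem):
--     """Convert a base mnemonic name to a PascalCase trait-friendly name.
--     e.g. 'MOV' -> 'Mov', 'VADDPS' -> 'Vaddps', 'C_EX' -> 'CEx'
--     """
--     # Handle leading underscores or digits
--     prefix = ''
--     name = base_mnem
--     if name.startswith('_'):
--         prefix = '_'
--         name = name[1:]
--
--     parts = name.split('_')
--     result = ''
--     for part in parts:
--         if part:
--             result += part[0].upper() + part[1:].lower()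
--
--     full = prefix + result
--     # Ensure the result is a valid Rust identifier (cannot start with digit)
--     if full and full[0].isdigit():
--         full = '_' + full
--     return full
-- ===== SOURCE B (Python) =====
-- def _scan_words(s):
--     """One pass over the characters: underscores set a cap flag and vanish,
--     every other character is emitted upper- or lower-cased."""
--     out = []
--     cap = True
--     for ch in s:
--         if ch == '_':
--             cap = True
--         else:
--             out.append(ch.upper() if cap else ch.lower())
--             cap = False
--     return ''.join(out)
--
--
-- def _trait_name_for_mnemonic(base_mnem):
--     """Early-return decomposition: a kept leading underscore short-circuits the
--     digit guard; otherwise guard the scanned body."""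
--     if base_mnem.startswith('_'):
--         return '_' + _scan_words(base_mnem[1:])
--     body = _scan_words(base_mnem)
--     if body and body[0].isdigit():
--         return '_' + body
--     return body
-- ===== Notes on version B (the rewrite author's own statement) =====
-- stated objective: alternative
-- what changed: Replaced split('_') plus a per-part capitalize loop and a shared prefix/guard tail with an early-return decomposition around a single character scan: a kept leading underscore returns immediately (making the digit guard unreachable there), and the scan streams each character upper/lower under a cap flag with no intermediate parts list.
import Mathlib
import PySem

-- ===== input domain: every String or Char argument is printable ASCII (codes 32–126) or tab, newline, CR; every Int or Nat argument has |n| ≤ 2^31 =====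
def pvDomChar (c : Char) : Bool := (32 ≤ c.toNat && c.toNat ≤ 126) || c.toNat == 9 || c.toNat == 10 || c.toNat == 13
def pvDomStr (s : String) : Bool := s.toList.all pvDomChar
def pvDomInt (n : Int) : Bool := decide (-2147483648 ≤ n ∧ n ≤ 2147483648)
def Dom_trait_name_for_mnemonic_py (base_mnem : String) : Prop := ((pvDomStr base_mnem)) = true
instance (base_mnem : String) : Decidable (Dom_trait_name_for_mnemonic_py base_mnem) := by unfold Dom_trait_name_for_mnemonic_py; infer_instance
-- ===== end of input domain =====

-- B replaces A's split('_')+per-part loop+shared prefix/guard tail with an early-return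
-- decomposition around a single cap-flag character scan (alternative decomposition, same O(n) cost).

-- ===== PORT A =====
-- `part[0].upper() + part[1:].lower()` guarded by `if part:` — the nonempty part is matched as c :: rest
def pvA_capStep (acc : List Char) (part : List Char) : List Char :=
  match part with
  | [] => acc
  | c :: rest => acc ++ (PySem.Chars.upperChar c :: PySem.Chars.lower rest)

-- full = prefix + result; prepend '_' if full is nonempty and starts with a digit
def pvA_finish (pfx : List Char) (result : List Char) : List Char :=
  let full := pfx ++ result
  match full with
  | [] => full
  | c :: _ => if PySem.Chars.isdigit c then '_' :: full else full

def trait_name_for_mnemonic_py (base_mnem : String) : String :=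
  let s := base_mnem.toList
  let pfx : List Char := if PySem.Chars.startswith s ['_'] then ['_'] else []
  let name : List Char := if PySem.Chars.startswith s ['_'] then PySem.Chars.slice s (some 1) none else s
  let parts := PySem.Chars.splitOn name ['_']
  let result := parts.foldl pvA_capStep []
  String.ofList (pvA_finish pfx result)

-- ===== PORT B =====
-- _scan_words: the append loop `out.append(…)` + ''.join(out), ported as a
-- tail-recursive accumulator (consed in reverse, reversed once at the end)
def pvB_scanWords : List Char → Bool → List Char → List Char
  | [], _, acc => acc.reverse
  | ch :: r, cap, acc =>
    if ch = '_' then pvB_scanWords r true acc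
    else pvB_scanWords r false ((if cap then PySem.Chars.upperChar ch else PySem.Chars.lowerChar ch) :: acc)

def trait_name_for_mnemonic_py_alt (base_mnem : String) : String :=
  let s := base_mnem.toList
  if PySem.Chars.startswith s ['_'] then
    String.ofList ('_' :: pvB_scanWords (PySem.Chars.slice s (some 1) none) true [])
  else
    let body := pvB_scanWords s true []
    match body with
    | [] => String.ofList body
    | c :: _ => String.ofList (if PySem.Chars.isdigit c then '_' :: body else body)

-- ===== PRECONDITION & SPEC =====
def Spec_trait_name_for_mnemonic_py (base_mnem : String) (out : String) : Prop := out = trait_name_for_mnemonic_py_alt base_mnem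
instance (base_mnem : String) (out : String) : Decidable (Spec_trait_name_for_mnemonic_py base_mnem out) := by unfold Spec_trait_name_for_mnemonic_py; infer_instance

-- ===== CLAIM =====
def Claim_equal_trait_name_for_mnemonic_py : Prop := ∀ (base_mnem : String), Dom_trait_name_for_mnemonic_py base_mnem → Spec_trait_name_for_mnemonic_py base_mnem (trait_name_for_mnemonic_py base_mnem)

-- ===== LEMMAS AND PROOFS =====

-- simple structural recursion computing splitOn on the single-char separator '_'
def pvSplit : List Char → List (List Char)
  | [] => [[]]
  | c :: rest => if c = '_' then [] :: pvSplit rest else (pvSplit rest).modifyHead (c :: ·)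

lemma pvSplit_ne_nil (cs : List Char) : pvSplit cs ≠ [] := by
  induction cs with
  | nil => simp [pvSplit]
  | cons c rest ih =>
    simp only [pvSplit]
    split
    · simp
    · cases h : pvSplit rest with
      | nil => exact absurd h ih
      | cons a l => simp [List.modifyHead]

lemma pvGo_eq (cs : List Char) : ∀ (fuel : Nat) (cur : List Char) (acc : List (List Char)),
    cs.length ≤ fuel →
    PySem.Chars.splitOn.go ['_'] fuel cs cur acc
      = acc.reverse ++ (pvSplit cs).modifyHead (cur.reverse ++ ·) := by
  induction cs with
  | nil =>
    intro fuel cur acc _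
    cases fuel <;> simp [PySem.Chars.splitOn.go, pvSplit]
  | cons c rest ih =>
    intro fuel cur acc hlen
    cases fuel with
    | zero => simp at hlen
    | succ f =>
      rw [PySem.Chars.splitOn.go.eq_def]
      by_cases hc : c = '_'
      · subst hc
        have hp : List.isPrefixOf ['_'] ('_' :: rest) = true := by
          simp [List.isPrefixOf]
        simp only [hp, if_true, List.length_cons, List.length_nil, List.drop_succ_cons,
          List.drop_zero]
        rw [ih f [] _ (by simpa using Nat.lt_succ_iff.mp (by simpa using hlen))]
        simp only [pvSplit, List.reverse_cons, List.modifyHead, List.append_assoc,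
          List.singleton_append]
        cases h : pvSplit rest <;> simp
      · have hp : List.isPrefixOf ['_'] (c :: rest) = false := by
          simp [List.isPrefixOf]
          exact fun h => hc h.symm
        simp only [hp, Bool.false_eq_true, if_false]
        rw [ih f (c :: cur) acc (by simpa using Nat.lt_succ_iff.mp (by simpa using hlen))]
        simp only [pvSplit, if_neg hc, List.reverse_cons]
        congr 1
        obtain ⟨h, t, hh⟩ : ∃ h t, pvSplit rest = h :: t := by
          cases hs : pvSplit rest with
          | nil => exact absurd hs (pvSplit_ne_nil rest)
          | cons h t => exact ⟨h, t, rfl⟩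
        simp [hh, List.modifyHead]

lemma splitOn_eq_pvSplit (cs : List Char) :
    PySem.Chars.splitOn cs ['_'] = pvSplit cs := by
  unfold PySem.Chars.splitOn
  rw [pvGo_eq cs (cs.length + 1) [] [] (by omega)]
  cases pvSplit cs <;> simp [List.modifyHead]

-- the per-part capitalization A concatenates
def pvCap : List Char → List Char
  | [] => []
  | c :: rest => PySem.Chars.upperChar c :: PySem.Chars.lower rest

def pvCapcat (parts : List (List Char)) : List Char := (parts.map pvCap).flatten

lemma foldl_capStep (parts : List (List Char)) : ∀ init,
    parts.foldl pvA_capStep init = init ++ pvCapcat parts := by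
  induction parts with
  | nil => intro init; simp [pvCapcat]
  | cons p ps ih =>
    intro init
    simp only [List.foldl_cons, ih, pvCapcat, List.map_cons, List.flatten_cons]
    cases p with
    | nil => simp [pvA_capStep, show pvCap [] = [] from rfl]
    | cons a l => simp [pvA_capStep, pvCap, PySem.Chars.lower]

-- direct (non-accumulator) form of the scan, for the induction
def pvScan : List Char → Bool → List Char
  | [], _ => []
  | c :: rest, capNext =>
    if c = '_' then pvScan rest true
    else (if capNext then PySem.Chars.upperChar c else PySem.Chars.lowerChar c) :: pvScan rest false

lemma scanWords_eq_pvScan (cs : List Char) : ∀ (cap : Bool) (acc : List Char),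
    pvB_scanWords cs cap acc = acc.reverse ++ pvScan cs cap := by
  induction cs with
  | nil => intro cap acc; simp [pvB_scanWords, pvScan]
  | cons c rest ih =>
    intro cap acc
    by_cases hc : c = '_' <;>
      simp [pvB_scanWords, pvScan, hc, ih]

-- the scan computes exactly A's concatenation of capitalized parts
lemma scan_eq_capcat (cs : List Char) :
    pvScan cs true = pvCapcat (pvSplit cs) ∧
    pvScan cs false = (match pvSplit cs with
      | [] => []
      | h :: t => PySem.Chars.lower h ++ pvCapcat t) := by
  induction cs with
  | nil => simp [pvScan, pvSplit, pvCapcat, PySem.Chars.lower, show pvCap [] = [] from rfl]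
  | cons c rest ih =>
    obtain ⟨ih1, ih2⟩ := ih
    by_cases hc : c = '_'
    · subst hc
      constructor
      · simp [pvScan, pvSplit, pvCapcat, ih1, pvCap]
      · simp [pvScan, pvSplit, ih1, PySem.Chars.lower]
    · obtain ⟨h, t, hh⟩ : ∃ h t, pvSplit rest = h :: t := by
        cases hs : pvSplit rest with
        | nil => exact absurd hs (pvSplit_ne_nil rest)
        | cons h t => exact ⟨h, t, rfl⟩
      rw [hh] at ih2
      constructor
      · simp [pvScan, hc, ih2, pvSplit, hh, List.modifyHead, pvCapcat, pvCap,
          PySem.Chars.lower]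
      · simp [pvScan, hc, ih2, pvSplit, hh, List.modifyHead, pvCapcat,
          PySem.Chars.lower]

-- ===== VERDICT =====
theorem trait_name_for_mnemonic_py_spec : Claim_equal_trait_name_for_mnemonic_py := by
  intro base_mnem _
  unfold Spec_trait_name_for_mnemonic_py trait_name_for_mnemonic_py trait_name_for_mnemonic_py_alt
  by_cases hpre : PySem.Chars.startswith base_mnem.toList ['_']
  · simp only [hpre, if_true, splitOn_eq_pvSplit, foldl_capStep, List.nil_append,
      scanWords_eq_pvScan, List.reverse_nil, (scan_eq_capcat _).1]
    simp [pvA_finish, show PySem.Chars.isdigit '_' = false from rfl]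
  · simp only [hpre, splitOn_eq_pvSplit, foldl_capStep, List.nil_append,
      scanWords_eq_pvScan, List.reverse_nil, (scan_eq_capcat _).1]
    rcases h : pvCapcat (pvSplit base_mnem.toList) with _ | ⟨c, t⟩ <;> simp [pvA_finish, h]
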